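-- pv_equiv track=rewrite | github.com/wojciech-galan/Viral_feature_extractor | src/commonFunctions.py | revSubList
-- ===== SOURCE A (Python) =====
-- def revSubList( seq, list_of_tup_sub ):
-- 	'''Argumenty:
-- 		- seq - sekwencja
-- 		- list_of_tup_sub - lista krotek opisujących początki i końce non-overlapping podsekwencji, które trzeba wykluczyć z danej
-- 		Przykładowo, dla 'abcdefghij', [ (1,5), (7,9) ] zwraca [ (0,1), (5,7), (9,10) ] '''
-- 	if len( list_of_tup_sub ) < 1:
-- 		return [ (0, len(seq)) ]
-- 	temp_s = set( range(0, len(seq)) )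
-- 	ret_list = []
-- 	start = min( temp_s )
-- 	for tup_sub in list_of_tup_sub:
-- 		temp_s -= set( range( tup_sub[0], tup_sub[1] ) )
-- 	if temp_s:
-- 		temp_s = list( temp_s )
-- 		temp_s.sort()
-- 		for x in range( 1, len(temp_s) ):
-- 			if temp_s[x] > 1 + temp_s[x-1]:
-- 				ret_list.append( (start, temp_s[x-1]+1) )
-- 				start = temp_s[x]
-- 		ret_list.append( (start, temp_s[x]+1) )
-- 		return ret_list
-- 	else:
-- 		return [ ]
-- ===== SOURCE B (Python) =====
-- def revSubList(seq, list_of_tup_sub):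
--     n = len(seq)
--     if not list_of_tup_sub:
--         return [(0, n)]
--     ivs = [(max(a, 0), min(b, n)) for a, b in list_of_tup_sub if max(a, 0) < min(b, n)]
--     ivs.sort(key=lambda t: t[0])
--     ret = []
--     pos = 0
--     for a, b in ivs:
--         if a > pos:
--             ret.append((pos, a))
--         pos = max(pos, b)
--     if pos < n:
--         ret.append((pos, n))
--     return ret
-- ===== Notes on version B (the rewrite author's own statement) =====
-- stated objective: alternative
-- what changed: B computes the gap intervals by sorting the clamped excluded intervals and sweeping over them directly, instead of A's materialising set(range(len(seq))), subtracting a set per interval, sorting the surviving indices and scanning them for jumps.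
-- intended difference: On a nonempty interval list where some pair covers index 0 while some index of the sequence survives, A returns a first gap starting at 0 (its 'start' is min() of the full index set taken before the exclusions) while B starts the first gap at the first surviving index, which is the intended complement interval. — e.g. on revSubList("abc", [(0, 1)]): A returns [(0, 3)], B returns [(1, 3)]
import Mathlib
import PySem

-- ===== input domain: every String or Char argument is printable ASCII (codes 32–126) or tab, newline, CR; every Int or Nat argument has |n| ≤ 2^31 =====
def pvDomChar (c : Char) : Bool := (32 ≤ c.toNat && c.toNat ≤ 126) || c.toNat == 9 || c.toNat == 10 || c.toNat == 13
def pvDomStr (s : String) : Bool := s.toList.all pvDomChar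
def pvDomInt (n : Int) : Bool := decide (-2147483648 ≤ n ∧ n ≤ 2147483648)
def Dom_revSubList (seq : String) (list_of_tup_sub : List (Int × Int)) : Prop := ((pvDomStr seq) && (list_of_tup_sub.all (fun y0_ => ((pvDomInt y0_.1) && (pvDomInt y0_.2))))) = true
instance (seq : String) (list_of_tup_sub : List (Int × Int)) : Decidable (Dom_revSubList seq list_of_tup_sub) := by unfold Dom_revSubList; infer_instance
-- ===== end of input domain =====

-- B computes the gap intervals by a sweep over the sorted, clamped excluded intervals themselves,
-- replacing A's index-set machinery (set(range(len(seq))) minus ranges, sort, scan for jumps);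
-- neither version mutates its arguments.

-- ===== PORT A =====
def revSubList (seq : String) (list_of_tup_sub : List (Int × Int)) : List (Int × Int) :=
  if list_of_tup_sub.length < 1 then [(0, PySem.Str.len seq)]
  else
    let temp_s : PySem.Set Int := PySem.Set.ofList (PySem.List.pyRange 0 (PySem.Str.len seq) 1)
    -- start = min(temp_s): ValueError on an empty set (len(seq) == 0); total form here, excluded by Pre_
    let start : Int := (PySem.List.min? temp_s (fun x => x)).getD 0
    -- temp_s -= set(range(a, b)): Set.diff consumes any iterable and pyRange is duplicate-free,
    -- so subtracting the range list is exactly subtracting set(range(a, b))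
    let temp_s : PySem.Set Int :=
      list_of_tup_sub.foldl
        (fun s tup => PySem.Set.diff s (PySem.List.pyRange tup.1 tup.2 1)) temp_s
    if temp_s = [] then []
    else
      let ts := PySem.List.sorted temp_s (fun x => x) false
      let st := (PySem.List.pyRange 1 (PySem.List.len ts) 1).foldl
        (fun (st : Int × List (Int × Int)) x =>
          if PySem.List.pyGetD ts x 0 > 1 + PySem.List.pyGetD ts (x - 1) 0 then
            (PySem.List.pyGetD ts x 0, st.2 ++ [(st.1, PySem.List.pyGetD ts (x - 1) 0 + 1)])
          else st)
        (start, ([] : List (Int × Int)))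
      -- final 'temp_s[x]' uses the x left over from the loop: NameError when len(temp_s) = 1
      -- (excluded by Pre_); for len ≥ 2 that leftover x is len(temp_s) - 1
      st.2 ++ [(st.1, PySem.List.pyGetD ts (PySem.List.len ts - 1) 0 + 1)]

-- ===== PORT B =====
def revSubList_alt (seq : String) (list_of_tup_sub : List (Int × Int)) : List (Int × Int) :=
  let n : Int := PySem.Str.len seq
  if list_of_tup_sub = [] then [(0, n)]
  else
    let ivs := (list_of_tup_sub.map (fun p => (max p.1 0, min p.2 n))).filter
      (fun p => decide (p.1 < p.2))
    let ivs := PySem.List.sorted ivs (fun t => t.1) false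
    let st := ivs.foldl
      (fun (st : Int × List (Int × Int)) p =>
        (max st.1 p.2, if p.1 > st.1 then st.2 ++ [(st.1, p.1)] else st.2))
      (0, ([] : List (Int × Int)))
    st.2 ++ (if st.1 < n then [(st.1, n)] else [])

-- ===== PRECONDITION & SPEC =====
-- shared closed-form predicate: position i lies inside some excluded (start, end) pair
def pvCov (l : List (Int × Int)) (i : Int) : Bool :=
  l.any (fun p => decide (p.1 ≤ i) && decide (i < p.2))

-- Pre_ excludes exactly the inputs where A raises: min() of an empty set (empty seq with a nonempty
-- tuple list, ValueError) and the leftover-loop-variable NameError when exactly one index survives.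
def Pre_revSubList (seq : String) (list_of_tup_sub : List (Int × Int)) : Prop :=
  list_of_tup_sub = [] ∨
    (0 < PySem.Str.len seq ∧
      ((PySem.List.pyRange 0 (PySem.Str.len seq) 1).filter
        (fun i => !pvCov list_of_tup_sub i)).length ≠ 1)
instance (seq : String) (list_of_tup_sub : List (Int × Int)) : Decidable (Pre_revSubList seq list_of_tup_sub) := by unfold Pre_revSubList; infer_instance

def pvWitness_revSubList : String × (List (Int × Int)) := ("ab", [])

-- On a nonempty tuple list one of whose pairs covers index 0 (while some index of the sequence stays
-- uncovered), A returns a first gap starting at 0 — its 'start' is min() of the FULL index set, taken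
-- before the exclusions — while B starts the first gap at the first surviving index, the intended value.
def D_revSubList (seq : String) (list_of_tup_sub : List (Int × Int)) : Prop :=
  list_of_tup_sub ≠ [] ∧
  list_of_tup_sub.any (fun p => decide (p.1 ≤ 0) && decide (0 < p.2)) = true ∧
  (PySem.List.pyRange 0 (PySem.Str.len seq) 1).any (fun i => !pvCov list_of_tup_sub i) = true
instance (seq : String) (list_of_tup_sub : List (Int × Int)) : Decidable (D_revSubList seq list_of_tup_sub) := by unfold D_revSubList; infer_instance

def Spec_revSubList (seq : String) (list_of_tup_sub : List (Int × Int)) (out : List (Int × Int)) : Prop :=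
  ¬ D_revSubList seq list_of_tup_sub → out = revSubList_alt seq list_of_tup_sub
instance (seq : String) (list_of_tup_sub : List (Int × Int)) (out : List (Int × Int)) : Decidable (Spec_revSubList seq list_of_tup_sub out) := by unfold Spec_revSubList; infer_instance

def pvDiffWitness_revSubList : String × (List (Int × Int)) := ("abc", [(0, 1)])
def pvDiffWitnessOut_revSubList : (List (Int × Int)) × (List (Int × Int)) := ([(0, 3)], [(1, 3)])

-- ===== CLAIM (what is proved, stated in full; the proofs are below) =====
def Claim_unchanged_revSubList : Prop := ∀ (seq : String) (list_of_tup_sub : List (Int × Int)), Dom_revSubList seq list_of_tup_sub → Pre_revSubList seq list_of_tup_sub → Spec_revSubList seq list_of_tup_sub (revSubList seq list_of_tup_sub)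
def Claim_changed_revSubList : Prop := Dom_revSubList (pvDiffWitness_revSubList.1) (pvDiffWitness_revSubList.2) ∧ Pre_revSubList (pvDiffWitness_revSubList.1) (pvDiffWitness_revSubList.2) ∧ D_revSubList (pvDiffWitness_revSubList.1) (pvDiffWitness_revSubList.2) ∧ revSubList (pvDiffWitness_revSubList.1) (pvDiffWitness_revSubList.2) = pvDiffWitnessOut_revSubList.1 ∧ revSubList_alt (pvDiffWitness_revSubList.1) (pvDiffWitness_revSubList.2) = pvDiffWitnessOut_revSubList.2 ∧ pvDiffWitnessOut_revSubList.1 ≠ pvDiffWitnessOut_revSubList.2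
def Claim_exact_revSubList : Prop := ∀ (seq : String) (list_of_tup_sub : List (Int × Int)), Dom_revSubList seq list_of_tup_sub → Pre_revSubList seq list_of_tup_sub → D_revSubList seq list_of_tup_sub → revSubList seq list_of_tup_sub ≠ revSubList_alt seq list_of_tup_sub

-- ===== LEMMAS AND PROOFS =====

-- the common shape of both outputs: maximal runs of the surviving (sorted) index list
def runs (start prev : Int) : List Int → List (Int × Int)
  | [] => [(start, prev + 1)]
  | y :: t => if 1 + prev < y then (start, prev + 1) :: runs y y t else runs start y t

def runsOf : List Int → List (Int × Int)
  | [] => []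
  | h :: t => runs h h t

theorem runs_head (start prev : Int) (m : List Int) :
    ∃ e rest, runs start prev m = (start, e) :: rest := by
  induction m generalizing prev with
  | nil => exact ⟨prev + 1, [], rfl⟩
  | cons y t ih =>
    by_cases h : 1 + prev < y
    · exact ⟨prev + 1, runs y y t, by simp [runs, h]⟩
    · obtain ⟨e, rest, hr⟩ := ih y
      exact ⟨e, rest, by simp [runs, h, hr]⟩

theorem runs_range_append (s : Int) (m : List Int) :
    ∀ (k : Nat) (p v : Int), v = p + 1 + k → (∀ x ∈ m, v < x) →
      runs s p (PySem.List.pyRange (p + 1) v 1 ++ m) = (s, v) :: runsOf m := by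
  intro k
  induction k with
  | zero =>
    intro p v hv hm
    rw [PySem.List.pyRange_one_eq_nil (by omega)]
    cases m with
    | nil => simp [runs, runsOf]; omega
    | cons h t =>
      have : 1 + p < h := by have := hm h (by simp); omega
      simp [runs, runsOf, this]; omega
  | succ k ih =>
    intro p v hv hm
    rw [PySem.List.pyRange_one_cons (by omega)]
    have : runs s p ((p + 1) :: (PySem.List.pyRange (p + 1 + 1) v 1 ++ m))
        = runs s (p + 1) (PySem.List.pyRange (p + 1 + 1) v 1 ++ m) := by
      simp [runs]
    rw [List.cons_append, this, ih (p + 1) v (by omega) hm]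

theorem runsOf_range (u v : Int) :
    runsOf (PySem.List.pyRange u v 1) = if u < v then [(u, v)] else [] := by
  by_cases h : u < v
  · rw [PySem.List.pyRange_one_cons h]
    have := runs_range_append u ([] : List Int) (v - u - 1).toNat u v (by omega) (by simp)
    simp only [List.append_nil] at this
    simp [runsOf, this, h]
  · rw [PySem.List.pyRange_one_eq_nil (by omega)]
    simp [runsOf, h]

-- ---- A-side: the subtraction loop computes the filtered index list ----

theorem subtract_mem (L : List (Int × Int)) :
    ∀ (s : List Int) (x : Int),
      x ∈ L.foldl (fun s tup => PySem.Set.diff s (PySem.List.pyRange tup.1 tup.2 1)) s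
      ↔ x ∈ s ∧ pvCov L x = false := by
  induction L with
  | nil => simp [pvCov]
  | cons p t ih =>
    intro s x
    rw [List.foldl_cons, ih]
    rw [PySem.Set.mem_diff]
    simp [pvCov, PySem.List.mem_pyRange_one]
    tauto

theorem subtract_nodup (L : List (Int × Int)) :
    ∀ (s : List Int), s.Nodup →
      (L.foldl (fun s tup => PySem.Set.diff s (PySem.List.pyRange tup.1 tup.2 1)) s).Nodup := by
  induction L with
  | nil => intro s hs; simpa
  | cons p t ih =>
    intro s hs
    rw [List.foldl_cons]
    exact ih _ (PySem.Set.nodup_diff _ _ hs)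

-- ---- A-side: the indexed gap loop is `runs` ----

theorem idxfold (ts : List Int) (F : (Int × List (Int × Int)) → Int → Int → (Int × List (Int × Int))) :
    ∀ (k a : Nat) (init : Int × List (Int × Int)), ts.length = a + k → 1 ≤ a →
      (PySem.List.pyRange a (PySem.List.len ts) 1).foldl
        (fun st x => F st (PySem.List.pyGetD ts (x - 1) 0) (PySem.List.pyGetD ts x 0)) init
      = ((ts.drop (a - 1)).zip (ts.drop a)).foldl (fun st pc => F st pc.1 pc.2) init := by
  intro k
  induction k with
  | zero =>
    intro a init hlen ha
    have hnil : ts.drop a = [] := List.drop_eq_nil_of_le (by omega)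
    rw [PySem.List.len_eq, PySem.List.pyRange_one_eq_nil (by omega), hnil]
    simp
  | succ k ih =>
    intro a init hlen ha
    have halt : a < ts.length := by omega
    have ha1 : a - 1 < ts.length := by omega
    rw [PySem.List.len_eq, PySem.List.pyRange_one_cons (by omega)]
    rw [List.foldl_cons]
    have e1 : PySem.List.pyGetD ts ((a : Int) - 1) 0 = ts[a - 1] := by
      rw [show ((a : Int) - 1) = ((a - 1 : Nat) : Int) by omega]
      simp [ha1]
    have e2 : PySem.List.pyGetD ts (a : Int) 0 = ts[a] := by simp [halt]
    rw [e1, e2]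
    have d1 : ts.drop (a - 1) = ts[a - 1] :: ts.drop a := by
      rw [List.drop_eq_getElem_cons ha1, show a - 1 + 1 = a by omega]
    have d2 : ts.drop a = ts[a] :: ts.drop (a + 1) := List.drop_eq_getElem_cons halt
    rw [d1, d2, List.zip_cons_cons, List.foldl_cons]
    have := ih (a + 1) (F init ts[a - 1] ts[a]) (by omega) (by omega)
    rw [PySem.List.len_eq] at this
    rw [show a + 1 - 1 = a from rfl] at this
    rw [d2] at this
    exact this

theorem zipfold (h0 : Int) :
    ∀ (t : List Int) (h s : Int) (acc : List (Int × Int)),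
      (let st := ((h :: t).zip t).foldl
          (fun (st : Int × List (Int × Int)) pc =>
            if pc.2 > 1 + pc.1 then (pc.2, st.2 ++ [(st.1, pc.1 + 1)]) else st) (s, acc);
        st.2 ++ [(st.1, (h :: t).getLastD h0 + 1)])
      = acc ++ runs s h t := by
  intro t
  induction t with
  | nil => intro h s acc; simp [runs]
  | cons y t' ih =>
    intro h s acc
    simp only [List.zip_cons_cons, List.foldl_cons]
    by_cases hy : y > 1 + h
    · simp only [if_pos hy]
      have := ih y y (acc ++ [(s, h + 1)])
      simp only [List.getLastD_cons] at this ⊢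
      rw [this]
      simp [runs, show 1 + h < y by omega]
    · simp only [if_neg hy]
      have := ih y s acc
      simp only [List.getLastD_cons] at this ⊢
      rw [this]
      simp [runs, show ¬ (1 + h < y) by omega]

-- ---- B-side: the interval sweep produces the runs of the surviving indices ----

theorem sweep (n : Int) :
    ∀ (ivs : List (Int × Int)) (pos : Int) (acc : List (Int × Int)),
      ivs.Pairwise (fun p q => p.1 ≤ q.1) →
      (∀ p ∈ ivs, p.1 < p.2 ∧ 0 ≤ p.1 ∧ p.2 ≤ n) →
      0 ≤ pos →
      (let st := ivs.foldl
          (fun (st : Int × List (Int × Int)) p =>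
            (max st.1 p.2, if p.1 > st.1 then st.2 ++ [(st.1, p.1)] else st.2)) (pos, acc);
        st.2 ++ (if st.1 < n then [(st.1, n)] else []))
      = acc ++ runsOf ((PySem.List.pyRange pos n 1).filter (fun i => !pvCov ivs i)) := by
  intro ivs
  induction ivs with
  | nil =>
    intro pos acc _ _ _
    simp only [List.foldl_nil, pvCov, List.any_nil, Bool.not_false, List.filter_true]
    rw [runsOf_range]
  | cons p t ih =>
    intro pos acc hpw hb hpos
    obtain ⟨a, b⟩ := p
    have hab : a < b := (hb (a, b) (by simp)).1
    have ha0 : 0 ≤ a := (hb (a, b) (by simp)).2.1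
    have hbn : b ≤ n := (hb (a, b) (by simp)).2.2
    have hpwt : t.Pairwise (fun p q => p.1 ≤ q.1) := hpw.of_cons
    have hbt : ∀ q ∈ t, q.1 < q.2 ∧ 0 ≤ q.1 ∧ q.2 ≤ n := fun q hq => hb q (by simp [hq])
    have hfst : ∀ q ∈ t, a ≤ q.1 := by
      intro q hq; exact (List.pairwise_cons.mp hpw).1 q hq
    simp only [List.foldl_cons]
    by_cases hgap : a > pos
    · simp only [if_pos hgap]
      have hmax : max pos b = b := by omega
      rw [hmax]
      rw [ih b (acc ++ [(pos, a)]) hpwt hbt (by omega)]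
      -- split [pos,n) at a and at b
      have hsplit1 : PySem.List.pyRange pos n 1
          = PySem.List.pyRange pos a 1 ++ PySem.List.pyRange a n 1 :=
        PySem.List.pyRange_one_append pos a n (by omega) (by omega)
      have hsplit2 : PySem.List.pyRange a n 1
          = PySem.List.pyRange a b 1 ++ PySem.List.pyRange b n 1 :=
        PySem.List.pyRange_one_append a b n (by omega) (by omega)
      rw [hsplit1, hsplit2, List.filter_append, List.filter_append]
      have hf1 : (PySem.List.pyRange pos a 1).filter (fun i => !pvCov ((a, b) :: t) i)
          = PySem.List.pyRange pos a 1 := by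
        apply List.filter_eq_self.mpr
        intro i hi
        rw [PySem.List.mem_pyRange_one] at hi
        simp only [pvCov, List.any_cons, Bool.not_eq_eq_eq_not, Bool.not_true, Bool.or_eq_false_iff]
        constructor
        · simp; omega
        · simp only [List.any_eq_false]
          intro q hq
          have := hfst q hq
          simp; omega
      have hf2 : (PySem.List.pyRange a b 1).filter (fun i => !pvCov ((a, b) :: t) i) = [] := by
        apply List.filter_eq_nil_iff.mpr
        intro i hi
        rw [PySem.List.mem_pyRange_one] at hi
        simp [pvCov]; omega
      have hf3 : (PySem.List.pyRange b n 1).filter (fun i => !pvCov ((a, b) :: t) i)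
          = (PySem.List.pyRange b n 1).filter (fun i => !pvCov t i) := by
        apply List.filter_congr
        intro i hi
        rw [PySem.List.mem_pyRange_one] at hi
        simp only [pvCov, List.any_cons]
        have : (decide (a ≤ i) && decide (i < b)) = false := by simp; omega
        rw [this, Bool.false_or]
      rw [hf1, hf2, hf3, List.nil_append]
      -- runsOf (pyRange pos a ++ m') = (pos, a) :: runsOf m'
      have hm' : ∀ x ∈ (PySem.List.pyRange b n 1).filter (fun i => !pvCov t i), a < x := by
        intro x hx
        have := (List.mem_filter.mp hx).1
        rw [PySem.List.mem_pyRange_one] at this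
        omega
      rw [show PySem.List.pyRange pos a 1 = pos :: PySem.List.pyRange (pos + 1) a 1 from
        PySem.List.pyRange_one_cons (by omega), List.cons_append]
      have := runs_range_append pos
        ((PySem.List.pyRange b n 1).filter (fun i => !pvCov t i))
        (a - pos - 1).toNat pos a (by omega) hm'
      rw [show runsOf (pos :: (PySem.List.pyRange (pos + 1) a 1 ++
          (PySem.List.pyRange b n 1).filter (fun i => !pvCov t i)))
        = runs pos pos (PySem.List.pyRange (pos + 1) a 1 ++
          (PySem.List.pyRange b n 1).filter (fun i => !pvCov t i)) from rfl, this]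
      simp
    · simp only [if_neg hgap]
      have hale : a ≤ pos := by omega
      rw [ih (max pos b) acc hpwt hbt (by omega)]
      congr 2
      by_cases hble : b ≤ pos
      · have : max pos b = pos := by omega
        rw [this]
        apply List.filter_congr
        intro i hi
        rw [PySem.List.mem_pyRange_one] at hi
        simp only [pvCov, List.any_cons]
        have : (decide (a ≤ i) && decide (i < b)) = false := by simp; omega
        rw [this, Bool.false_or]
      · have hmax : max pos b = b := by omega
        rw [hmax]
        have hsplit : PySem.List.pyRange pos n 1
            = PySem.List.pyRange pos b 1 ++ PySem.List.pyRange b n 1 :=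
          PySem.List.pyRange_one_append pos b n (by omega) (by omega)
        rw [hsplit, List.filter_append]
        have hf1 : (PySem.List.pyRange pos b 1).filter (fun i => !pvCov ((a, b) :: t) i) = [] := by
          apply List.filter_eq_nil_iff.mpr
          intro i hi
          rw [PySem.List.mem_pyRange_one] at hi
          simp [pvCov]; omega
        have hf2 : (PySem.List.pyRange b n 1).filter (fun i => !pvCov ((a, b) :: t) i)
            = (PySem.List.pyRange b n 1).filter (fun i => !pvCov t i) := by
          apply List.filter_congr
          intro i hi
          rw [PySem.List.mem_pyRange_one] at hi
          simp only [pvCov, List.any_cons]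
          have : (decide (a ≤ i) && decide (i < b)) = false := by simp; omega
          rw [this, Bool.false_or]
        rw [hf1, hf2, List.nil_append]

-- ---- characterizations of the two ports ----

-- the surviving (ascending) index list
def pvRem (seq : String) (l : List (Int × Int)) : List Int :=
  (PySem.List.pyRange 0 (PySem.Str.len seq) 1).filter (fun i => !pvCov l i)

theorem B_char (seq : String) (l : List (Int × Int)) (hl : l ≠ []) :
    revSubList_alt seq l = runsOf (pvRem seq l) := by
  have hn0 : (0 : Int) ≤ PySem.Str.len seq := by
    rw [PySem.Str.len_eq]; positivity
  set n := PySem.Str.len seq with hn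
  set ivs := PySem.List.sorted
      ((l.map (fun p => (max p.1 0, min p.2 n))).filter (fun p => decide (p.1 < p.2)))
      (fun t => t.1) false with hivs
  have hpw : ivs.Pairwise (fun p q => p.1 ≤ q.1) := PySem.List.sorted_pairwise _ _
  have hmem : ∀ p ∈ ivs, p.1 < p.2 ∧ 0 ≤ p.1 ∧ p.2 ≤ n := by
    intro p hp
    rw [hivs, PySem.List.mem_sorted, List.mem_filter, List.mem_map] at hp
    obtain ⟨⟨q, _, hq⟩, hlt⟩ := hp
    refine ⟨by simpa using hlt, ?_, ?_⟩ <;> rw [← hq] <;> simp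
  have hsw := sweep n ivs 0 [] hpw hmem (le_refl 0)
  simp only [] at hsw
  have hcov : (PySem.List.pyRange 0 n 1).filter (fun i => !pvCov ivs i)
      = (PySem.List.pyRange 0 n 1).filter (fun i => !pvCov l i) := by
    apply List.filter_congr
    intro i hi
    rw [PySem.List.mem_pyRange_one] at hi
    congr 1
    rw [Bool.eq_iff_iff]
    simp only [pvCov, List.any_eq_true]
    constructor
    · rintro ⟨p, hp, hpi⟩
      rw [hivs, PySem.List.mem_sorted, List.mem_filter, List.mem_map] at hp
      obtain ⟨⟨q, hq, hqe⟩, _⟩ := hp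
      refine ⟨q, hq, ?_⟩
      rw [← hqe] at hpi
      simp at hpi ⊢
      omega
    · rintro ⟨q, hq, hqi⟩
      refine ⟨(max q.1 0, min q.2 n), ?_, ?_⟩
      · rw [hivs, PySem.List.mem_sorted, List.mem_filter, List.mem_map]
        simp at hqi
        exact ⟨⟨q, hq, rfl⟩, by simp; omega⟩
      · simp at hqi ⊢
        omega
  rw [hcov] at hsw
  simp only [revSubList_alt, if_neg hl, ← hn, ← hivs]
  rw [List.nil_append] at hsw
  exact hsw

-- the A-side subtraction loop, after sorting, is exactly the ascending surviving-index list
theorem A_sorted (seq : String) (l : List (Int × Int)) :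
    PySem.List.sorted
      (l.foldl (fun s tup => PySem.Set.diff s (PySem.List.pyRange tup.1 tup.2 1))
        (PySem.Set.ofList (PySem.List.pyRange 0 (PySem.Str.len seq) 1)))
      (fun x => x) false = pvRem seq l := by
  set n := PySem.Str.len seq with hn
  have hbase : PySem.Set.ofList (PySem.List.pyRange 0 n 1) = PySem.List.pyRange 0 n 1 :=
    PySem.Set.ofList_eq_self_of_nodup _ (PySem.List.nodup_pyRange_one 0 n)
  set ts := l.foldl
      (fun s tup => PySem.Set.diff s (PySem.List.pyRange tup.1 tup.2 1))
      (PySem.Set.ofList (PySem.List.pyRange 0 n 1)) with hts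
  have hmem : ∀ x, x ∈ ts ↔ x ∈ PySem.List.pyRange 0 n 1 ∧ pvCov l x = false := by
    intro x; rw [hts, hbase]; exact subtract_mem l _ x
  have hnd : ts.Nodup := by
    rw [hts, hbase]; exact subtract_nodup l _ (PySem.List.nodup_pyRange_one 0 n)
  have hperm : (pvRem seq l).Perm ts := by
    rw [pvRem, ← hn,
      List.perm_ext_iff_of_nodup (List.Nodup.filter _ (PySem.List.nodup_pyRange_one 0 n)) hnd]
    intro a
    rw [hmem, List.mem_filter]
    simp
  have hpwlt : (pvRem seq l).Pairwise (· < ·) :=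
    List.Pairwise.sublist (List.filter_sublist) (PySem.List.pairwise_lt_pyRange_one 0 n)
  exact PySem.List.sorted_eq_of_perm_of_pairwise_lt ts (pvRem seq l) (fun x => x) hperm hpwlt

theorem A_start (n : Int) (hn : 0 < n) :
    (PySem.List.min? (PySem.List.pyRange 0 n 1) (fun x => x)).getD 0 = 0 := by
  rw [PySem.List.pyRange_one_cons hn, PySem.List.min?_id_cons, Option.getD_some]
  rcases PySem.List.foldl_min_mem (PySem.List.pyRange (0 + 1) n 1) 0 with h | h
  · exact h
  · exfalso
    have h1 := (PySem.List.foldl_min_le (PySem.List.pyRange (0 + 1) n 1) 0).1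
    rw [PySem.List.mem_pyRange_one] at h
    omega

theorem A_loop (m : Int) (rt : List Int) (start : Int) :
    (let ts := m :: rt
     let st := (PySem.List.pyRange 1 (PySem.List.len ts) 1).foldl
        (fun (st : Int × List (Int × Int)) x =>
          if PySem.List.pyGetD ts x 0 > 1 + PySem.List.pyGetD ts (x - 1) 0 then
            (PySem.List.pyGetD ts x 0, st.2 ++ [(st.1, PySem.List.pyGetD ts (x - 1) 0 + 1)])
          else st)
        (start, ([] : List (Int × Int)))
     st.2 ++ [(st.1, PySem.List.pyGetD ts (PySem.List.len ts - 1) 0 + 1)])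
    = runs start m rt := by
  have hidx := idxfold (m :: rt)
    (fun st prev cur => if cur > 1 + prev then (cur, st.2 ++ [(st.1, prev + 1)]) else st)
    rt.length 1 (start, []) (by simp [List.length_cons]; omega) (le_refl 1)
  simp only [Nat.cast_one, show (1 : Nat) - 1 = 0 from rfl, List.drop_zero, List.drop_one,
    List.tail_cons] at hidx
  have hlast : PySem.List.pyGetD (m :: rt) (PySem.List.len (m :: rt) - 1) 0
      = (m :: rt).getLastD 0 := by
    rw [PySem.List.len_eq,
      show ((m :: rt).length : Int) - 1 = ((rt.length : Nat) : Int) by simp,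
      PySem.List.pyGetD_natCast]
    rw [List.getD_eq_getElem?_getD, List.getLastD_eq_getLast?, List.getLast?_eq_getElem?]
    simp
  have hz := zipfold 0 rt m start []
  simp only [List.nil_append] at hz
  simp only []
  rw [hidx, hlast]
  exact hz

theorem A_char (seq : String) (l : List (Int × Int)) (hl : l ≠ [])
    (hn0 : 0 < PySem.Str.len seq) (m : Int) (rt : List Int) (hrem : pvRem seq l = m :: rt) :
    revSubList seq l = runs 0 m rt := by
  have hlen : ¬ (l.length < 1) := by
    cases l with
    | nil => exact absurd rfl hl
    | cons a t => simp
  simp only [revSubList, if_neg hlen]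
  set n := PySem.Str.len seq with hn
  have hsorted : PySem.List.sorted
      (l.foldl (fun s tup => PySem.Set.diff s (PySem.List.pyRange tup.1 tup.2 1))
        (PySem.Set.ofList (PySem.List.pyRange 0 n 1)))
      (fun x => x) false = m :: rt := by
    rw [hn, A_sorted seq l, hrem]
  have htne : ¬ (l.foldl (fun s tup => PySem.Set.diff s (PySem.List.pyRange tup.1 tup.2 1))
      (PySem.Set.ofList (PySem.List.pyRange 0 n 1)) = []) := by
    intro h
    rw [h] at hsorted
    exact absurd hsorted.symm (List.cons_ne_nil m rt)
  rw [if_neg htne, hsorted]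
  have hstart : (PySem.List.min? (PySem.Set.ofList (PySem.List.pyRange 0 n 1)) (fun x => x)).getD 0
      = 0 := by
    rw [PySem.Set.ofList_eq_self_of_nodup _ (PySem.List.nodup_pyRange_one 0 n)]
    exact A_start n hn0
  rw [hstart]
  exact A_loop m rt 0

theorem A_char_nil (seq : String) (l : List (Int × Int)) (hl : l ≠ [])
    (hrem : pvRem seq l = []) : revSubList seq l = [] := by
  have hlen : ¬ (l.length < 1) := by
    cases l with
    | nil => exact absurd rfl hl
    | cons a t => simp
  simp only [revSubList, if_neg hlen]
  set n := PySem.Str.len seq with hn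
  have hsorted : PySem.List.sorted
      (l.foldl (fun s tup => PySem.Set.diff s (PySem.List.pyRange tup.1 tup.2 1))
        (PySem.Set.ofList (PySem.List.pyRange 0 n 1)))
      (fun x => x) false = [] := by
    rw [hn, A_sorted seq l, hrem]
  have htnil : l.foldl (fun s tup => PySem.Set.diff s (PySem.List.pyRange tup.1 tup.2 1))
      (PySem.Set.ofList (PySem.List.pyRange 0 n 1)) = [] := by
    exact (PySem.List.sorted_eq_nil_iff _ _ _).mp hsorted
  rw [if_pos htnil]

theorem rem_ne_nil_iff (seq : String) (l : List (Int × Int)) :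
    (PySem.List.pyRange 0 (PySem.Str.len seq) 1).any (fun i => !pvCov l i) = true
      ↔ pvRem seq l ≠ [] := by
  rw [pvRem, Ne, List.filter_eq_nil_iff, List.any_eq_true]
  push Not
  constructor
  · rintro ⟨x, hx, hp⟩
    exact ⟨x, hx, by simpa using hp⟩
  · rintro ⟨x, hx, hp⟩
    exact ⟨x, hx, by simpa using hp⟩

theorem rem_pairwise (seq : String) (l : List (Int × Int)) :
    (pvRem seq l).Pairwise (· < ·) :=
  List.Pairwise.sublist (List.filter_sublist)
    (PySem.List.pairwise_lt_pyRange_one 0 (PySem.Str.len seq))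

theorem rem_mem (seq : String) (l : List (Int × Int)) (x : Int) :
    x ∈ pvRem seq l ↔ (0 ≤ x ∧ x < PySem.Str.len seq) ∧ pvCov l x = false := by
  rw [pvRem, List.mem_filter, PySem.List.mem_pyRange_one]
  simp

-- ===== VERDICT (by name: the statement is the Claim_ definition above) =====
theorem revSubList_spec : Claim_unchanged_revSubList := by
  intro seq l _ hPre hD
  by_cases hl : l = []
  · subst hl
    simp [revSubList, revSubList_alt]
  · obtain ⟨hn0, -⟩ := hPre.resolve_left hl
    cases hrem : pvRem seq l with
    | nil =>
      rw [A_char_nil seq l hl hrem, B_char seq l hl, hrem]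
      rfl
    | cons m rt =>
      have hcov0 : pvCov l 0 = false := by
        by_contra hc
        exact hD ⟨hl, by simpa [pvCov] using hc,
          (rem_ne_nil_iff seq l).mpr (by rw [hrem]; exact List.cons_ne_nil m rt)⟩
      have hmmem : m ∈ pvRem seq l := by rw [hrem]; exact List.mem_cons_self
      have hm0 : 0 ≤ m := ((rem_mem seq l m).mp hmmem).1.1
      have h0mem : (0 : Int) ∈ pvRem seq l := by
        rw [rem_mem]
        exact ⟨⟨le_refl 0, hn0⟩, hcov0⟩
      have hpw := rem_pairwise seq l
      rw [hrem] at h0mem hpw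
      have hm : m = 0 := by
        rcases List.mem_cons.mp h0mem with h | h
        · omega
        · have := (List.pairwise_cons.mp hpw).1 0 h
          omega
      rw [A_char seq l hl hn0 m rt hrem, B_char seq l hl, hrem, hm]
      rfl

theorem revSubList_changed : Claim_changed_revSubList := by
  unfold Claim_changed_revSubList; decide

theorem revSubList_tight : Claim_exact_revSubList := by
  intro seq l _ hPre hD
  obtain ⟨hl, hcov0, hany⟩ := hD
  obtain ⟨hn0, -⟩ := hPre.resolve_left hl
  have hne : pvRem seq l ≠ [] := (rem_ne_nil_iff seq l).mp hany
  obtain ⟨m, rt, hrem⟩ : ∃ m rt, pvRem seq l = m :: rt := by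
    cases h : pvRem seq l with
    | nil => exact absurd h hne
    | cons m rt => exact ⟨m, rt, rfl⟩
  have hmmem := (rem_mem seq l m).mp (by rw [hrem]; exact List.mem_cons_self)
  have hm : m ≠ 0 := by
    intro h
    rw [h] at hmmem
    rw [show pvCov l 0 = l.any (fun p => decide (p.1 ≤ 0) && decide (0 < p.2)) from rfl, hcov0]
      at hmmem
    exact absurd hmmem.2 (by simp)
  rw [A_char seq l hl hn0 m rt hrem, B_char seq l hl, hrem,
    show runsOf (m :: rt) = runs m m rt from rfl]
  obtain ⟨e, rest, hA⟩ := runs_head 0 m rt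
  obtain ⟨e', rest', hB⟩ := runs_head m m rt
  rw [hA, hB]
  intro hEq
  have h1 : ((0 : Int), e) = (m, e') := (List.cons.inj hEq).1
  have h2 : (0 : Int) = m := congrArg Prod.fst h1
  exact hm h2.symm
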